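-- pv_equiv track=rewrite | github.com/deffi/elastic-tables | src/elastic_tabs/parser.py | chunks_from_lines
-- ===== SOURCE A (Python) =====
-- from typing import Iterator, Iterable, List, Sequence
--
-- def chunks_from_lines(lines: Iterable[str]) -> Iterator[Sequence[str]]:
--     rows: List[str] = []
--
--     for line in lines:
--         rows.append(line)
--         if len(line.strip()) == 0:
--             yield rows
--             rows = []
--
--     yield rows
-- ===== SOURCE B (Python) =====
-- def chunks_from_lines(lines):
--     all_lines = list(lines)
--     splits = [i for i, line in enumerate(all_lines) if not line.strip()]
--     start = 0
--     for i in splits: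
--         yield all_lines[start:i + 1]
--         start = i + 1
--     yield all_lines[start:]
-- ===== Notes on version B (the rewrite author's own statement) =====
-- stated objective: alternative
-- what changed: Replaces accumulate-and-flush over a growing rows buffer with an index-table-then-slice shape: materialize the lines, collect the indices of blank lines in one comprehension, then yield successive slices between consecutive split points.
import Mathlib
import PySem

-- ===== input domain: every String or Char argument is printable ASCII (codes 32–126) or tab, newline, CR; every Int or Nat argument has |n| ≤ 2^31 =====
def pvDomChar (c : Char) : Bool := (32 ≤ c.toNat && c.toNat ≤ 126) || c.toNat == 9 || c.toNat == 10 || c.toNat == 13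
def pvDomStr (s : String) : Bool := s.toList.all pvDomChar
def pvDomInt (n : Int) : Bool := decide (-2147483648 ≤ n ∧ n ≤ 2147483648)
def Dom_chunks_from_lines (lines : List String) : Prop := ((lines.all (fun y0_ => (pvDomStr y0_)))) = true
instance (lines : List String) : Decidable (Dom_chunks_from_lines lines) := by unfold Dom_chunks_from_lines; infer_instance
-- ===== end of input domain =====

-- B replaces A's accumulate-and-flush buffer with an index-table-then-slice decomposition
-- (collect blank-line indices, then cut slices between consecutive split points); alternative, same cost.
-- A is a Python generator; both are ported as the list of all yielded chunks.

-- ===== PORT A =====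
-- loop body: rows.append(line); if the stripped line is empty, yield rows and reset
def pvStepA (st : List (List String) × List String) (line : String) :
    List (List String) × List String :=
  let rows := st.2 ++ [line]
  if PySem.Str.len (PySem.Str.strip line) == 0 then (st.1 ++ [rows], ([] : List String))
  else (st.1, rows)

def chunks_from_lines (lines : List String) : List (List String) :=
  let st := lines.foldl pvStepA (([] : List (List String)), ([] : List String))
  st.1 ++ [st.2]

-- ===== PORT B =====
-- splits = [i for i, line in enumerate(all_lines) if not line.strip()]
def pvSplits (all_lines : List String) : List Int :=
  ((PySem.List.enumerate all_lines 0).filter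
      (fun p => PySem.Str.strip p.2 == "")).map (fun p => p.1)

-- the for-loop over splits: yield all_lines[start:i+1], start = i+1; finally yield all_lines[start:]
def pvGoB (all_lines : List String) : List Int → Int → List (List String)
  | [], start => [PySem.List.slice all_lines (some start) none]
  | i :: is, start =>
      PySem.List.slice all_lines (some start) (some (i + 1)) :: pvGoB all_lines is (i + 1)

def chunks_from_lines_alt (lines : List String) : List (List String) :=
  pvGoB lines (pvSplits lines) 0

-- ===== PRECONDITION & SPEC =====
def Spec_chunks_from_lines (lines : List String) (out : List (List String)) : Prop := out = chunks_from_lines_alt lines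
instance (lines : List String) (out : List (List String)) : Decidable (Spec_chunks_from_lines lines out) := by unfold Spec_chunks_from_lines; infer_instance

-- ===== CLAIM (what is proved, stated in full; the proofs are below) =====
def Claim_equal_chunks_from_lines : Prop := ∀ (lines : List String), Dom_chunks_from_lines lines → Spec_chunks_from_lines lines (chunks_from_lines lines)

-- ===== LEMMAS AND PROOFS =====

/-- blank test shared by both proofs -/
def pvBlank (s : String) : Bool := PySem.Str.strip s == ""

/-- A's flush loop, structurally: the sequence of chunks yielded from buffer `rows`. -/
def pvF : List String → List String → List (List String)
  | [], rows => [rows]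
  | l :: ls, rows => if pvBlank l then (rows ++ [l]) :: pvF ls [] else pvF ls (rows ++ [l])

def pvPrep (p : List String) : List (List String) → List (List String)
  | [] => [p]
  | c :: cs => (p ++ c) :: cs

/-- blank-index table, structurally, over Nat. -/
def pvSplitsN : List String → List Nat
  | [] => []
  | l :: ls => if pvBlank l then 0 :: (pvSplitsN ls).map (· + 1) else (pvSplitsN ls).map (· + 1)

/-- B's slice walk over Nat indices. -/
def pvGoN (all_lines : List String) : List Nat → Nat → List (List String)
  | [], s => [all_lines.drop s]
  | i :: is, s => ((all_lines.drop s).take (i + 1 - s)) :: pvGoN all_lines is (i + 1)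

theorem pvLenZero (s : String) : (PySem.Str.len s == 0) = (s == "") := by
  simp only [PySem.Str.len_eq]
  by_cases h : s = ""
  · subst h; simp
  · simp [h]

theorem pvStepA_eq (st : List (List String) × List String) (line : String) :
    pvStepA st line =
      if pvBlank line then (st.1 ++ [st.2 ++ [line]], ([] : List String))
      else (st.1, st.2 ++ [line]) := by
  simp only [pvStepA, pvBlank, pvLenZero]
  split; rfl; rfl

theorem pvFoldA (ls : List String) : ∀ (acc : List (List String)) (rows : List String),
    (ls.foldl pvStepA (acc, rows)).1 ++ [(ls.foldl pvStepA (acc, rows)).2]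
      = acc ++ pvF ls rows := by
  induction ls with
  | nil => intro acc rows; simp [pvF]
  | cons l ls ih =>
    intro acc rows
    rw [List.foldl_cons, pvStepA_eq]
    by_cases h : pvBlank l
    · rw [if_pos h]
      simp only [pvF, h]
      rw [ih (acc ++ [rows ++ [l]]) [], List.append_assoc]
      rfl
    · rw [if_neg h]
      simp only [pvF, h, Bool.false_eq_true, if_false]
      exact ih acc (rows ++ [l])

theorem pvA_eq_F (lines : List String) : chunks_from_lines lines = pvF lines [] := by
  have := pvFoldA lines [] []
  simpa [chunks_from_lines] using this

theorem pvF_prep (ls : List String) : ∀ rows, pvF ls rows = pvPrep rows (pvF ls []) := by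
  induction ls with
  | nil => intro rows; simp [pvF, pvPrep]
  | cons l ls ih =>
    intro rows
    by_cases h : pvBlank l
    · simp [pvF, h, pvPrep]
    · simp only [pvF, h, Bool.false_eq_true, if_false, List.nil_append]
      rw [ih (rows ++ [l]), ih [l]]
      cases hF : pvF ls [] with
      | nil => simp [pvPrep]
      | cons c cs => simp [pvPrep]

-- enumerate shift: starting one later adds one to every kept index
theorem pvEnumShift (ls : List String) : ∀ (s : Int),
    ((PySem.List.enumerate ls (s + 1)).filter (fun p => PySem.Str.strip p.2 == "")).map (fun p => p.1)
      = (((PySem.List.enumerate ls s).filter (fun p => PySem.Str.strip p.2 == "")).map (fun p => p.1)).map (· + 1) := by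
  induction ls with
  | nil => intro s; simp [PySem.List.enumerate_nil]
  | cons l ls ih =>
    intro s
    rw [PySem.List.enumerate_cons, PySem.List.enumerate_cons]
    by_cases h : (PySem.Str.strip l == "") = true
    · simp only [List.filter_cons, h, if_pos, List.map_cons]
      rw [ih (s + 1)]
    · simp only [List.filter_cons, h, Bool.false_eq_true, if_false]
      rw [ih (s + 1)]

theorem pvSplits_eq (lines : List String) :
    pvSplits lines = List.map (fun (n : Nat) => (n : Int)) (pvSplitsN lines) := by
  induction lines with
  | nil => simp [pvSplits, pvSplitsN, PySem.List.enumerate_nil]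
  | cons l ls ih =>
    have hsh := pvEnumShift ls 0
    by_cases h : pvBlank l
    · have h' : (PySem.Str.strip l == "") = true := h
      simp only [pvSplits, PySem.List.enumerate_cons, List.filter_cons, h', if_pos,
        List.map_cons, pvSplitsN, h]
      rw [hsh]
      rw [show ((PySem.List.enumerate ls 0).filter (fun p => PySem.Str.strip p.2 == "")).map (fun p => p.1) = pvSplits ls from rfl, ih]
      simp [List.map_map]
    · have h' : (PySem.Str.strip l == "") = false := by simpa [pvBlank] using h
      simp only [pvSplits, PySem.List.enumerate_cons, List.filter_cons, h', Bool.false_eq_true,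
        if_false, pvSplitsN, h]
      rw [hsh]
      rw [show ((PySem.List.enumerate ls 0).filter (fun p => PySem.Str.strip p.2 == "")).map (fun p => p.1) = pvSplits ls from rfl, ih]
      simp [List.map_map]

theorem pvGoB_eq_GoN (all_lines : List String) : ∀ (ns : List Nat) (s : Nat),
    pvGoB all_lines (List.map (fun (n : Nat) => (n : Int)) ns) (s : Int) = pvGoN all_lines ns s := by
  intro ns
  induction ns with
  | nil => intro s; simp [pvGoB, pvGoN, PySem.List.slice_from_natCast]
  | cons n ns ih =>
    intro s
    simp only [List.map_cons, pvGoB, pvGoN]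
    rw [show ((n : Int) + 1) = ((n + 1 : Nat) : Int) by push_cast; ring,
      PySem.List.slice_natCast, ih (n + 1)]

theorem pvGoN_shift (x : String) (all_lines : List String) :
    ∀ (ns : List Nat) (s : Nat), pvGoN (x :: all_lines) (ns.map (· + 1)) (s + 1) = pvGoN all_lines ns s := by
  intro ns
  induction ns with
  | nil => intro s; simp [pvGoN]
  | cons n ns ih =>
    intro s
    simp only [List.map_cons, pvGoN, List.drop_succ_cons]
    rw [show n + 1 + 1 - (s + 1) = n + 1 - s by omega, ih (n + 1)]

theorem pvGoN_eq_F (lines : List String) : pvGoN lines (pvSplitsN lines) 0 = pvF lines [] := by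
  induction lines with
  | nil => simp [pvGoN, pvSplitsN, pvF]
  | cons l ls ih =>
    by_cases h : pvBlank l
    · simp only [pvSplitsN, h, if_true, pvGoN, pvF, List.nil_append]
      rw [show (0:Nat) + 1 - 0 = 1 by omega,
        show (0:Nat) + 1 = 0 + 1 by omega, pvGoN_shift l ls (pvSplitsN ls) 0, ih]
      simp
    · simp only [pvSplitsN, h, Bool.false_eq_true, if_false, pvF, List.nil_append]
      rw [pvF_prep ls [l], ← ih]
      cases hs : pvSplitsN ls with
      | nil => simp [pvGoN, pvPrep]
      | cons n ns =>
        simp only [List.map_cons, pvGoN, List.drop_zero]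
        rw [show n + 1 + 1 - 0 = (n + 1 - 0) + 1 by omega,
          show n + 1 + 1 = (n + 1) + 1 from rfl, pvGoN_shift l ls ns (n + 1)]
        simp [pvPrep, List.take_succ_cons]

-- ===== VERDICT (by name: the statement is the Claim_ definition above) =====
theorem chunks_from_lines_spec : Claim_equal_chunks_from_lines := by
  intro lines _
  unfold Spec_chunks_from_lines chunks_from_lines_alt
  rw [pvSplits_eq, show (0 : Int) = ((0 : Nat) : Int) from rfl, pvGoB_eq_GoN, pvGoN_eq_F, pvA_eq_F]
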